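-- pv_equiv track=rewrite | github.com/agrc/MasterStreetAddressGuideVisualizer | ToolModules/AddressTableParser.py | _buildStreetName
-- ===== SOURCE A (Python) =====
-- def _buildStreetName(preDir, streetName):
--     """Build the street name from parts that exist in many fields in input table"""
--     streetAddress = ""
--
--     if not preDir == None:
--         if len(preDir) > 0:
--             streetAddress = preDir
--
--     streetAddress = streetAddress + " " + streetName.strip()
--
--
--     for c in range(34,48):
--         streetAddress = streetAddress.replace(chr(c)," ")
--     streetAddress = streetAddress.replace("_"," ")
--
--     return streetAddress
-- ===== SOURCE B (Python) =====
-- def _buildStreetName(preDir, streetName):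
--     """Build the street name from parts that exist in many fields in input table"""
--     bad = {chr(c) for c in range(34, 48)} | {"_"}
--     prefix = preDir if preDir else ""
--     streetAddress = prefix + " " + streetName.strip()
--     return "".join(" " if ch in bad else ch for ch in streetAddress)
-- ===== Notes on version B (the rewrite author's own statement) =====
-- stated objective: alternative
-- what changed: Replaces A's 15 sequential full-string replace() scans with one precomputed bad-character set and a single pass over the string that maps each bad character to a space.
import Mathlib
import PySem

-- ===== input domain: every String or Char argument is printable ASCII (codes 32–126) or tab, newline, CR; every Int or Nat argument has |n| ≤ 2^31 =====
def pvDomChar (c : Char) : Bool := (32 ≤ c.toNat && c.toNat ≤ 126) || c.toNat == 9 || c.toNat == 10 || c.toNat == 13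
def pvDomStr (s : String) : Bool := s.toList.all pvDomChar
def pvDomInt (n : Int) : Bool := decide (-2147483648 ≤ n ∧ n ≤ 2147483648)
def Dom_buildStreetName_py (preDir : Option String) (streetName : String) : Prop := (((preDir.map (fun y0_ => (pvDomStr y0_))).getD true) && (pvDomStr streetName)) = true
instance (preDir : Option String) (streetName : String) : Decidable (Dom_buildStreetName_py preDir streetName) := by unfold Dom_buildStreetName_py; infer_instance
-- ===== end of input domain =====

-- B does one pass over the string with a precomputed bad-character set instead of A's 15 sequential full-string replace scans.

-- ===== PORT A =====
def buildStreetName_py (preDir : Option String) (streetName : String) : String :=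
  let streetAddress : String := ""
  let streetAddress : String :=
    match preDir with
    | some p => if 0 < PySem.Str.len p then p else streetAddress
    | none => streetAddress
  let streetAddress := streetAddress ++ " " ++ PySem.Str.strip streetName
  let streetAddress :=
    (PySem.List.pyRange 34 48 1).foldl
      (fun s c => PySem.Str.replace s (String.ofList [Char.ofNat c.toNat]) " ") streetAddress
  PySem.Str.replace streetAddress "_" " "

-- ===== PORT B =====
def buildStreetName_py_alt (preDir : Option String) (streetName : String) : String :=
  let bad : PySem.Set Char :=
    PySem.Set.ofList (((PySem.List.pyRange 34 48 1).map (fun c => Char.ofNat c.toNat)) ++ ['_'])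
  let pfx : String :=
    match preDir with
    | some p => if p ≠ "" then p else ""
    | none => ""
  let s := pfx ++ " " ++ PySem.Str.strip streetName
  String.ofList (s.toList.map (fun ch => if PySem.Set.contains bad ch then ' ' else ch))

-- ===== PRECONDITION & SPEC =====
def Spec_buildStreetName_py (preDir : Option String) (streetName : String) (out : String) : Prop := out = buildStreetName_py_alt preDir streetName
instance (preDir : Option String) (streetName : String) (out : String) : Decidable (Spec_buildStreetName_py preDir streetName out) := by unfold Spec_buildStreetName_py; infer_instance

-- ===== CLAIM (what is proved, stated in full; the proofs are below) =====
def Claim_equal_buildStreetName_py : Prop := ∀ (preDir : Option String) (streetName : String), Dom_buildStreetName_py preDir streetName → Spec_buildStreetName_py preDir streetName (buildStreetName_py preDir streetName)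

-- ===== LEMMAS AND PROOFS =====

-- replace.go with a single-character pattern is a pointwise map on the first `fuel` characters
theorem go_single (c d : Char) : ∀ (fuel : Nat) (l acc : List Char),
    PySem.Chars.replace.go [c] [d] fuel l acc =
      acc.reverse ++ (l.take fuel).map (fun x => if x = c then d else x) ++ l.drop fuel := by
  intro fuel
  induction fuel with
  | zero => intro l acc; simp [PySem.Chars.replace.go]
  | succ n ih =>
    intro l acc
    cases l with
    | nil => simp [PySem.Chars.replace.go]
    | cons h t =>
      rw [PySem.Chars.replace.go]
      by_cases hc : h = c
      · subst hc
        simp [List.isPrefixOf, ih]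
      · simp [List.isPrefixOf, hc, beq_iff_eq, Ne.symm hc, ih]

theorem replace_single (cs : List Char) (c d : Char) :
    PySem.Chars.replace cs [c] [d] = cs.map (fun x => if x = c then d else x) := by
  simp [PySem.Chars.replace, go_single]


theorem targets_eval : ([34,35,36,37,38,39,40,41,42,43,44,45,46,47] : List Int).map (fun c => Char.ofNat c.toNat) = ['"','#','$','%','&','\'','(',')','*','+',',','-','.','/'] := by decide

-- a loop of single-character replaces by ' ' is one pointwise map
theorem fold_replace (L : List Int) (S : String) :
    (L.foldl (fun s c => PySem.Str.replace s (String.ofList [Char.ofNat c.toNat]) " ") S).toList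
      = S.toList.map (fun ch => if ch ∈ L.map (fun c => Char.ofNat c.toNat) then ' ' else ch) := by
  induction L generalizing S with
  | nil => simp
  | cons x L ih =>
    simp only [List.foldl_cons]
    rw [ih]
    have hrep : (PySem.Str.replace S (String.ofList [Char.ofNat x.toNat]) " ").toList
        = S.toList.map (fun c => if c = Char.ofNat x.toNat then ' ' else c) := by
      simp only [PySem.Str.replace, String.toList_ofList]
      have h1 : (" " : String).toList = [' '] := rfl
      rw [h1, replace_single]
    rw [hrep, List.map_map]
    apply List.map_congr_left
    intro ch _
    simp only [Function.comp, List.map_cons, List.mem_cons]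
    by_cases hx : ch = Char.ofNat x.toNat
    · subst hx
      by_cases hsp : (' ' : Char) ∈ L.map (fun c => Char.ofNat c.toNat) <;> simp [hsp]
    · simp [hx]

theorem chain_eq (S : String) :
    PySem.Str.replace
      (([34,35,36,37,38,39,40,41,42,43,44,45,46,47] : List Int).foldl
        (fun s c => PySem.Str.replace s (String.ofList [Char.ofNat c.toNat]) " ") S) "_" " "
    = String.ofList (S.toList.map (fun ch =>
        if PySem.Set.contains (PySem.Set.ofList ((([34,35,36,37,38,39,40,41,42,43,44,45,46,47] : List Int).map (fun c => Char.ofNat c.toNat)) ++ ['_'])) ch then ' ' else ch)) := by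
  have hu : ("_" : String).toList = ['_'] := rfl
  have hsp : (" " : String).toList = [' '] := rfl
  rw [PySem.Str.replace, hu, hsp, fold_replace, replace_single, List.map_map, targets_eval]
  have hb : PySem.Set.ofList ((['"','#','$','%','&','\'','(',')','*','+',',','-','.','/'] : List Char) ++ ['_'])
      = ['"','#','$','%','&','\'','(',')','*','+',',','-','.','/','_'] := by decide
  rw [hb]
  congr 1
  apply List.map_congr_left
  intro ch _
  by_cases h14 : ch ∈ (['"','#','$','%','&','\'','(',')','*','+',',','-','.','/'] : List Char)
  · fin_cases h14 <;> rfl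
  · by_cases hu' : ch = '_'
    · subst hu'; decide
    · have hmem : ch ∉ (['"','#','$','%','&','\'','(',')','*','+',',','-','.','/','_'] : List Char) := by
        intro hc
        rcases List.mem_append.mp
            (by simpa using hc :
              ch ∈ (['"','#','$','%','&','\'','(',')','*','+',',','-','.','/'] : List Char) ++ ['_']) with h | h
        · exact h14 h
        · exact hu' (by simpa using h)
      simp only [List.mem_cons, List.not_mem_nil, or_false, not_or] at h14 hmem
      simp [PySem.Set.contains, List.contains_eq_mem, List.mem_cons, hu',
        h14.1, h14.2.1, h14.2.2.1, h14.2.2.2.1, h14.2.2.2.2.1, h14.2.2.2.2.2.1,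
        h14.2.2.2.2.2.2.1, h14.2.2.2.2.2.2.2.1, h14.2.2.2.2.2.2.2.2.1,
        h14.2.2.2.2.2.2.2.2.2.1, h14.2.2.2.2.2.2.2.2.2.2.1,
        h14.2.2.2.2.2.2.2.2.2.2.2.1, h14.2.2.2.2.2.2.2.2.2.2.2.2.1,
        h14.2.2.2.2.2.2.2.2.2.2.2.2.2]

-- ===== VERDICT (by name: the statement is the Claim_ definition above) =====
theorem buildStreetName_py_spec : Claim_equal_buildStreetName_py := by
  intro preDir streetName _
  unfold Spec_buildStreetName_py buildStreetName_py buildStreetName_py_alt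
  have hrange : PySem.List.pyRange 34 48 1 = [34,35,36,37,38,39,40,41,42,43,44,45,46,47] := by decide
  rw [hrange]
  cases preDir with
  | none => exact chain_eq _
  | some p =>
    by_cases h : p = ""
    · subst h
      have h0 : ¬ (0 < PySem.Str.len "") := by decide
      simp only [h0, if_false, ne_eq, not_true_eq_false, if_false]
      exact chain_eq _
    · have hne : p.toList ≠ [] := by
        intro hl
        apply h
        have := congrArg String.ofList hl
        simpa using this
      have hpos : 0 < PySem.Str.len p := by
        simp only [PySem.Str.len]
        exact_mod_cast List.length_pos_iff.mpr hne
      simp only [hpos, if_true, ne_eq, h, not_false_eq_true, if_true]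
      exact chain_eq _
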